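-- pv_equiv track=rewrite | github.com/abundrew/hackerrank | solutions/highway_construction.py | Ber
-- ===== SOURCE A (Python) =====
-- def FiF(nmax, modulus):
--     fif = [[0] * (nmax + 1) for i in range(2)]
--     fif[0][0] = 1
--     for i in range(1, nmax + 1):
--         fif[0][i] = int((fif[0][i - 1] * i) % modulus)
--     a, b = fif[0][nmax], modulus
--     p, q = 1, 0
--     while b > 0:
--         c, d = a // b, a
--         a, b = b, d % b
--         d = p
--         p, q = q, d - c * q
--     fif[1] = [0] * (nmax + 1)
--     fif[1][nmax] = int((p + modulus) if p < 0 else p)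
--     for i in range(nmax - 1, -1, -1):
--         fif[1][i] = int((fif[1][i + 1] * (i + 1)) % modulus)
--     return fif
--
-- def Choose(n, r, fif, modulus):
--     if n < 0 or r < 0 or r > n: return 0
--     return int((((fif[0][n] * fif[1][r]) % modulus) * fif[1][n - r]) % modulus)
--
-- def Mul(a, b, modulus):
--     return (a * b) % modulus
--
-- def Div(a, b, modulus):
--     return (a * Inv(b, modulus)) % modulus
--
-- def Inv(a, modulus):
--     b = modulus
--     p, q = 1, 0
--     while b > 0:
--         c, d = a // b, a
--         a, b = b, d % b
--         d = p
--         p, q = q, d - c * q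
--     return (p + modulus) if p < 0 else p
--
-- def Ber(M, R):
--     FIF = FiF(M + 1, R)
--
--     B = [0] * M;
--     B[0] = 1
--     for i in range(1, M):
--         b = 0
--         for j in range(i):
--             b = (b + Div(Mul(Choose(i, j, FIF, R), B[j], R), i - j + 1, R)) % R
--         B[i] = int((1 + R - b) % R)
--     return B
-- ===== SOURCE B (Python) =====
-- # Same Bernoulli recurrence, restructured: the inner sum is a convolution of two
-- # precomputed tables (inverse-factorial*B and inverse-factorial*inverse), so the
-- # extended-Euclid inversion leaves the inner loop entirely.
--
-- def _egcd_inv(a, modulus):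
--     b = modulus
--     p, q = 1, 0
--     while b > 0:
--         c, d = a // b, a
--         a, b = b, d % b
--         d = p
--         p, q = q, d - c * q
--     return (p + modulus) if p < 0 else p
--
-- def Ber(M, R):
--     n = M + 1
--     F = [1] * (n + 1)                       # factorials mod R
--     for i in range(1, n + 1):
--         F[i] = F[i - 1] * i % R
--     G = [1] * (n + 1)                       # inverse factorials (Euclid once)
--     G[n] = _egcd_inv(F[n], R)
--     for i in range(n - 1, -1, -1):
--         G[i] = G[i + 1] * (i + 1) % R
--     inv = [_egcd_inv(k, R) for k in range(n + 1)]
--     d = [G[k] * inv[k + 1] % R for k in range(n)]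
--     B = [0] * M
--     B[0] = 1
--     c = [G[0]]
--     for i in range(1, M):
--         s = sum(c[j] * d[i - j] for j in range(i)) % R
--         B[i] = (1 - F[i] * s) % R
--         c.append(G[i] * B[i] % R)
--     return B
-- ===== Notes on version B (the rewrite author's own statement) =====
-- stated objective: faster
-- what changed: The O(M^2) extended-Euclid inversions inside A's inner loop are eliminated: B precomputes factorials, inverse factorials and the inverses 1..M+1 once, folds them into two fixed tables c and d, and computes each B[i] as a plain convolution sum of c and d scaled by one factorial, with a single final mod.
import Mathlib
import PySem

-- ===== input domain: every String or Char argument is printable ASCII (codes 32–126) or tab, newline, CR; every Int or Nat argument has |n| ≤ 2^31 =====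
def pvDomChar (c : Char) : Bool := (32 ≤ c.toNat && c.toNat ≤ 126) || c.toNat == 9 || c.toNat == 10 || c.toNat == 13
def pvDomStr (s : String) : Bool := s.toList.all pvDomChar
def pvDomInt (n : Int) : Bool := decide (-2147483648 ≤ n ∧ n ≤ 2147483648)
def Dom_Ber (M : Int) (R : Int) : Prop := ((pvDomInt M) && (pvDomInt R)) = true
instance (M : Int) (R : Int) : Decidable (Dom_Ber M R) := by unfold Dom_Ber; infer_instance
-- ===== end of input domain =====

-- B replaces the extended-Euclid inversion done inside A's O(M^2) inner loop by tables
-- (inverses, factorials, inverse factorials) computed once, so each B[i] becomes a plain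
-- convolution sum with a single final reduction; measurably faster, same return values.

-- ===== SHARED HELPERS (code that is verbatim identical in Source A and Source B) =====
-- the extended-Euclid while-loop of Source A's Inv/FiF and Source B's _egcd_inv (returns final p)
def pvEgcd (a b p q : Int) : Int :=
  if h : 0 < b then pvEgcd b (PySem.Int.mod a b) q (p - PySem.Int.floordiv a b * q)
  else p
termination_by b.toNat
decreasing_by
  have h2 := PySem.Int.mod_lt a h
  have h1 := PySem.Int.mod_nonneg a h
  omega

-- Inv(a, R) of Source A = _egcd_inv(a, R) of Source B
def pyInv (a R : Int) : Int := (fun p => if p < 0 then p + R else p) (pvEgcd a R 1 0)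

-- the factorial fill  f[i] = f[i-1] * i % R  (Source A's fif[0], Source B's F), as index → value
def pyFact (R : Int) : Nat → Int
  | 0 => 1
  | i+1 => PySem.Int.mod (pyFact R i * ((i : Int) + 1)) R

-- the downward inverse-factorial fill (Source A's fif[1], Source B's G), indexed by distance from nmax
def pyInvFactAux (R : Int) (nmax : Nat) : Nat → Int
  | 0 => pyInv (pyFact R nmax) R
  | t+1 => PySem.Int.mod (pyInvFactAux R nmax t * ((nmax : Int) - t)) R

def pyInvFact (R : Int) (nmax i : Nat) : Int := pyInvFactAux R nmax (nmax - i)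

-- ===== PORT A =====
-- Choose(n, r, fif, R); n, r are the loop indices i, j : Nat, so only the r > n guard can fire
def ChooseA (R : Int) (nmax n r : Nat) : Int :=
  if r > n then 0
  else PySem.Int.mod (PySem.Int.mod (pyFact R n * pyInvFact R nmax r) R * pyInvFact R nmax (n - r)) R

-- the inner loop: b = (b + Div(Mul(Choose(i,j),B[j]), i-j+1)) % R  for j in range(i)
def innerA (R : Int) (nmax : Nat) (l : List Int) (i : Nat) : Int :=
  (List.range i).foldl
    (fun b j => PySem.Int.mod
      (b + PySem.Int.mod (PySem.Int.mod (ChooseA R nmax i j * l.getD j 0) R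
            * pyInv ((i : Int) - (j : Int) + 1) R) R) R) 0

-- the outer fill B[0] = 1; B[i] = (1 + R - b) % R, as the list of the first k entries
def berAList (R : Int) (nmax : Nat) : Nat → List Int
  | 0 => []
  | k+1 =>
    if k = 0 then [1]
    else berAList R nmax k ++
      [PySem.Int.mod (1 + R - innerA R nmax (berAList R nmax k) k) R]

def Ber (M : Int) (R : Int) : List Int := berAList R (M + 1).toNat M.toNat

-- ===== PORT B =====
-- inv = [_egcd_inv(k, R) for k in range(n+1)]
def invTabB (R : Int) (n : Nat) : List Int := (List.range (n+1)).map (fun k : Nat => pyInv (k : Int) R)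

-- d = [G[k] * inv[k+1] % R for k in range(n)]
def dTabB (R : Int) (n : Nat) : List Int :=
  (List.range n).map (fun k : Nat => PySem.Int.mod (pyInvFact R n k * (invTabB R n).getD (k+1) 0) R)

-- the main loop of Source B: state = (B, c); B[i] = (1 - F[i]*s) % R with s the convolution sum
def berBStep (R : Int) (n : Nat) (d : List Int) : Nat → List Int × List Int
  | 0 => ([], [])
  | k+1 =>
    if k = 0 then ([1], [pyInvFact R n 0])
    else
      let p := berBStep R n d k
      let s := PySem.Int.mod
        ((List.range k).foldl (fun acc j => acc + p.2.getD j 0 * d.getD (k - j) 0) 0) R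
      let bi := PySem.Int.mod (1 - pyFact R k * s) R
      (p.1 ++ [bi], p.2 ++ [PySem.Int.mod (pyInvFact R n k * bi) R])

def Ber_alt (M : Int) (R : Int) : List Int :=
  (berBStep R (M + 1).toNat (dTabB R (M + 1).toNat) M.toNat).1

-- ===== PRECONDITION & SPEC =====
-- exactly the inputs on which the Python A returns: M ≤ 0 raises IndexError (B[0] = 1 on
-- an empty list), R = 0 raises ZeroDivisionError (% 0 in FiF); A returns on everything else.
def Pre_Ber (M : Int) (R : Int) : Prop := 1 ≤ M ∧ R ≠ 0
instance (M : Int) (R : Int) : Decidable (Pre_Ber M R) := by unfold Pre_Ber; infer_instance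
def pvWitness_Ber : Int × Int := (4, 10)

def Spec_Ber (M : Int) (R : Int) (out : List Int) : Prop := out = Ber_alt M R
instance (M : Int) (R : Int) (out : List Int) : Decidable (Spec_Ber M R out) := by unfold Spec_Ber; infer_instance

-- ===== CLAIM =====
def Claim_equal_Ber : Prop := ∀ (M : Int) (R : Int), Dom_Ber M R → Pre_Ber M R → Spec_Ber M R (Ber M R)

-- ===== LEMMAS AND PROOFS =====

-- PySem.Int.mod a R is congruent to a modulo R
theorem pvMod_modEq (a R : Int) : Int.ModEq R (PySem.Int.mod a R) a := by
  have h := PySem.Int.floordiv_mul_add_mod a R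
  have : R ∣ a - PySem.Int.mod a R := ⟨PySem.Int.floordiv a R, by linarith [mul_comm (PySem.Int.floordiv a R) R]⟩
  exact (Int.modEq_iff_dvd.mpr this)

-- congruent integers have equal Python residues (for any nonzero modulus, either sign)
theorem pvMod_eq_of_modEq {R x y : Int} (hR : R ≠ 0) (h : Int.ModEq R x y) :
    PySem.Int.mod x R = PySem.Int.mod y R := by
  rcases lt_or_gt_of_ne hR with hneg | hpos
  · have hx := PySem.Int.mod_neg_bounds x hneg
    have hy := PySem.Int.mod_neg_bounds y hneg
    have hmx := pvMod_modEq x R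
    have hmy := pvMod_modEq y R
    have hd : R ∣ (PySem.Int.mod y R - PySem.Int.mod x R) :=
      Int.ModEq.dvd (hmx.trans (h.trans hmy.symm))
    have hz : PySem.Int.mod y R - PySem.Int.mod x R = 0 := by
      refine Int.eq_zero_of_abs_lt_dvd ((neg_dvd).mpr hd) ?_
      rw [abs_lt]; omega
    omega
  · rw [PySem.Int.mod_eq_emod_of_pos (a := x) hpos, PySem.Int.mod_eq_emod_of_pos (a := y) hpos]
    exact h

theorem berAList_succ (R : Int) (n k : Nat) :
    berAList R n (k+1) = berAList R n k ++
      [if k = 0 then (1:Int) else PySem.Int.mod (1 + R - innerA R n (berAList R n k) k) R] := by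
  rcases Nat.eq_zero_or_pos k with hk | hk
  · subst hk; simp [berAList]
  · simp [berAList, Nat.pos_iff_ne_zero.mp hk]

-- the A-side entry at index k
def aEnt (R : Int) (n : Nat) (k : Nat) : Int :=
  if k = 0 then 1 else PySem.Int.mod (1 + R - innerA R n (berAList R n k) k) R

theorem berAList_eq_map (R : Int) (n k : Nat) :
    berAList R n k = (List.range k).map (aEnt R n) := by
  induction k with
  | zero => simp [berAList]
  | succ k ih => rw [berAList_succ, List.range_succ, List.map_append, ih]; simp [aEnt, ih]

-- the B-side c entry at index k
def cEnt (R : Int) (n : Nat) (k : Nat) : Int :=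
  if k = 0 then pyInvFact R n 0 else PySem.Int.mod (pyInvFact R n k * aEnt R n k) R

theorem getD_map_range' (f : Nat → Int) (n k : Nat) (h : k < n) :
    ((List.range n).map f).getD k 0 = f k := by
  simp [List.getD, h]

-- the key congruence: one term of A's inner loop ≡ F k · (one term of B's convolution)
theorem term_congr (R : Int) (n k m : Nat) (hm : m < k) (hk : k < n) :
    Int.ModEq R
      (PySem.Int.mod (PySem.Int.mod (ChooseA R n k m * aEnt R n m) R
        * pyInv ((k : Int) - (m : Int) + 1) R) R)
      (pyFact R k * (cEnt R n m * (dTabB R n).getD (k - m) 0)) := by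
  have hd1 : (dTabB R n).getD (k - m) 0
      = PySem.Int.mod (pyInvFact R n (k - m) * (invTabB R n).getD (k - m + 1) 0) R :=
    getD_map_range' _ n (k - m) (by omega)
  have hd2 : (invTabB R n).getD (k - m + 1) 0 = pyInv ((k - m + 1 : Nat) : Int) R := by
    unfold invTabB; exact getD_map_range' _ (n + 1) (k - m + 1) (by omega)
  have hcast : ((k - m + 1 : Nat) : Int) = (k : Int) - (m : Int) + 1 := by omega
  have hch : ChooseA R n k m
      = PySem.Int.mod (PySem.Int.mod (pyFact R k * pyInvFact R n m) R * pyInvFact R n (k - m)) R := by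
    unfold ChooseA; rw [if_neg (by omega)]
  have e1 : Int.ModEq R
      (PySem.Int.mod (PySem.Int.mod (ChooseA R n k m * aEnt R n m) R
        * pyInv ((k : Int) - (m : Int) + 1) R) R)
      ((ChooseA R n k m * aEnt R n m) * pyInv ((k : Int) - (m : Int) + 1) R) :=
    (pvMod_modEq _ R).trans (Int.ModEq.mul_right _ (pvMod_modEq _ R))
  have e2 : Int.ModEq R (ChooseA R n k m)
      ((pyFact R k * pyInvFact R n m) * pyInvFact R n (k - m)) := by
    rw [hch]
    exact (pvMod_modEq _ R).trans (Int.ModEq.mul_right _ (pvMod_modEq _ R))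
  have e3 : Int.ModEq R (cEnt R n m) (pyInvFact R n m * aEnt R n m) := by
    unfold cEnt aEnt
    rcases Nat.eq_zero_or_pos m with h0 | h0
    · subst h0; simp
    · rw [if_neg (by omega), if_neg (by omega)]; exact pvMod_modEq _ R
  have e4 : Int.ModEq R ((dTabB R n).getD (k - m) 0)
      (pyInvFact R n (k - m) * pyInv ((k : Int) - (m : Int) + 1) R) := by
    rw [hd1, hd2, hcast]; exact pvMod_modEq _ R
  have e5 : Int.ModEq R
      ((ChooseA R n k m * aEnt R n m) * pyInv ((k : Int) - (m : Int) + 1) R)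
      (((pyFact R k * pyInvFact R n m) * pyInvFact R n (k - m)) * aEnt R n m
        * pyInv ((k : Int) - (m : Int) + 1) R) :=
    Int.ModEq.mul_right _ (Int.ModEq.mul_right _ e2)
  have hr : ((pyFact R k * pyInvFact R n m) * pyInvFact R n (k - m)) * aEnt R n m
        * pyInv ((k : Int) - (m : Int) + 1) R
      = pyFact R k * ((pyInvFact R n m * aEnt R n m)
        * (pyInvFact R n (k - m) * pyInv ((k : Int) - (m : Int) + 1) R)) := by ring
  have e6 : Int.ModEq R (pyFact R k * (cEnt R n m * (dTabB R n).getD (k - m) 0))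
      (pyFact R k * ((pyInvFact R n m * aEnt R n m)
        * (pyInvFact R n (k - m) * pyInv ((k : Int) - (m : Int) + 1) R))) :=
    Int.ModEq.mul_left _ (e3.mul e4)
  exact ((e1.trans e5).trans (hr ▸ Int.ModEq.refl _)).trans e6.symm

-- A's inner fold ≡ F k · B's inner fold, prefix by prefix
theorem fold_congr (R : Int) (n k : Nat) (hk : k < n) (m : Nat) (hm : m ≤ k) :
    Int.ModEq R
      ((List.range m).foldl
        (fun b j => PySem.Int.mod
          (b + PySem.Int.mod (PySem.Int.mod (ChooseA R n k j * ((List.range k).map (aEnt R n)).getD j 0) R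
                * pyInv ((k : Int) - (j : Int) + 1) R) R) R) 0)
      (pyFact R k *
        ((List.range m).foldl
          (fun acc j => acc + ((List.range k).map (cEnt R n)).getD j 0 * (dTabB R n).getD (k - j) 0) 0)) := by
  induction m with
  | zero => simp
  | succ m ih =>
    have hmk : m < k := by omega
    rw [List.range_succ, List.foldl_append, List.foldl_append]
    simp only [List.foldl_cons, List.foldl_nil]
    rw [getD_map_range' (aEnt R n) k m hmk, getD_map_range' (cEnt R n) k m hmk]
    refine (pvMod_modEq _ R).trans (Int.ModEq.trans ?_ (by rw [mul_add]))
    exact (ih (by omega)).add (term_congr R n k m hmk hk)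

-- main invariant: after k steps both ports hold the same B prefix, and c is the cEnt table
theorem main_inv (R : Int) (hR : R ≠ 0) (n : Nat) (k : Nat) (hk : k ≤ n - 1) (hn : 1 ≤ n) :
    (berBStep R n (dTabB R n) k).1 = berAList R n k ∧
    (berBStep R n (dTabB R n) k).2 = (List.range k).map (cEnt R n) := by
  induction k with
  | zero => exact ⟨rfl, rfl⟩
  | succ k ih =>
    rcases Nat.eq_zero_or_pos k with h0 | h0
    · subst h0
      constructor
      · simp [berBStep, berAList]
      · simp [berBStep, cEnt]
    · have hkn : k < n := by omega
      have ihh := ih (by omega)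
      have hk0 : k ≠ 0 := by omega
      simp only [berBStep, if_neg hk0, ihh.1, ihh.2]
      -- the appended entry of B equals the appended entry of A
      have hbi : PySem.Int.mod (1 - pyFact R k *
            PySem.Int.mod ((List.range k).foldl
              (fun acc j => acc + ((List.range k).map (cEnt R n)).getD j 0 * (dTabB R n).getD (k - j) 0) 0) R) R
          = aEnt R n k := by
        unfold aEnt
        rw [if_neg hk0, berAList_eq_map]
        refine (pvMod_eq_of_modEq hR ?_).symm
        have hfold := fold_congr R n k hkn k le_rfl
        have hs : Int.ModEq R
            (pyFact R k * PySem.Int.mod ((List.range k).foldl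
              (fun acc j => acc + ((List.range k).map (cEnt R n)).getD j 0 * (dTabB R n).getD (k - j) 0) 0) R)
            (innerA R n ((List.range k).map (aEnt R n)) k) :=
          (Int.ModEq.mul_left _ (pvMod_modEq _ R)).trans hfold.symm
        have hR0 : Int.ModEq R R 0 := Int.modEq_zero_iff_dvd.mpr dvd_rfl
        have : Int.ModEq R (1 + R - innerA R n ((List.range k).map (aEnt R n)) k)
            (1 + 0 - pyFact R k * PySem.Int.mod ((List.range k).foldl
              (fun acc j => acc + ((List.range k).map (cEnt R n)).getD j 0 * (dTabB R n).getD (k - j) 0) 0) R) :=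
          ((Int.ModEq.add_left 1 hR0).sub hs.symm)
        simpa using this
      constructor
      · rw [berAList_succ R n k, if_neg hk0, hbi]
        unfold aEnt
        rw [if_neg hk0]
      · rw [List.range_succ, List.map_append, hbi]
        simp [cEnt, hk0]

-- ===== VERDICT =====
theorem Ber_spec : Claim_equal_Ber := by
  intro M R _ hPre
  obtain ⟨hM, hR⟩ := hPre
  unfold Spec_Ber Ber Ber_alt
  have hn : (M + 1).toNat = M.toNat + 1 := by omega
  have h := main_inv R hR (M + 1).toNat M.toNat (by omega) (by omega)
  exact h.1.symm
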